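-- pv_equiv track=rewrite | github.com/wogus1001/naeilsajang | 백업/build_ground_truth_from_raw_v9.py | build_option_codes_and_label
-- ===== SOURCE A (Python) =====
-- OPTION_LABEL_BY_CODE = {
--     "1":"직원 승계 가능",
--     "2":"주차장 보유매장",
--     "3":"특수상권",
--     "4":"오토 운영 가능매장",
--     "5":"무권리",
--     "6":"영업기간 1년 이상",
--     "7":"양도 즉시가능",
--     "8":"없음",
-- }
--
-- def build_option_codes_and_label(row, op_code, st_code):
--     codes = []
--
--     # is_non_premium: 1이면 무권리 → code "5"
--     try:
--         if int(row.get("is_non_premium") or 0) == 1: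
--             codes.append("5")
--     except Exception:
--         pass
--
--     # operation_period: 1년 이상이면 → code "6"
--     try:
--         if int(row.get("operation_period") or 0) >= 12:
--             codes.append("6")
--     except Exception:
--         pass
--
--     # worker_cnt: 0(무인) 이면 → 오토 운영 가능 → code "4"
--     try:
--         if int(row.get("worker_cnt") or -1) == 0:
--             codes.append("4")
--     except Exception:
--         pass
--
--     # parking_cnt: 1~5 이면 → 주차장 보유 → code "2"
--     try:
--         pc = int(row.get("parking_cnt") or 0)
--         if pc in [1,2,3,4,5]:
--             codes.append("2")
--     except Exception:
--         pass
--
--     # sales_time_type: 0(즉시) 이면 → 양도 즉시가능 → code "7"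
--     if st_code == "0":
--         codes.append("7")
--
--     # is_employee_takeover: 1이면 → code "1"
--     try:
--         if int(row.get("is_employee_takeover") or 0) == 1:
--             codes.append("1")
--     except Exception:
--         pass
--
--     # store_type: 3(특수상권) 이면 → code "3"
--     try:
--         if int(row.get("store_type") or 0) == 3:
--             codes.append("3")
--     except Exception:
--         pass
--
--     # 중복 제거 & 정렬
--     codes = sorted(set(codes), key=lambda x: int(x))
--     label = ", ".join(OPTION_LABEL_BY_CODE[c] for c in codes) if codes else "없음"
--     if not codes: codes = ["8"]  # 선택 없음 → 8
--     return codes, label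
-- ===== SOURCE B (Python) =====
-- OPTION_LABELS = [None,
--     "직원 승계 가능", "주차장 보유매장", "특수상권", "오토 운영 가능매장",
--     "무권리", "영업기간 1년 이상", "양도 즉시가능", "없음",
-- ]
--
-- def build_option_codes_and_label(row, op_code, st_code):
--     # B: selected options are encoded as a bitmask (bit c <-> option code c),
--     # then the mask is decoded by a shift loop, so the codes come out distinct
--     # and ascending with no intermediate list, no set() and no sort.
--     def field(key, default):
--         # int(row.get(key) or default); None on a parse failure
--         try:
--             return int(row.get(key) or default)
--         except Exception:
--             return None
--
--     mask = 0
--     if field("is_employee_takeover", 0) == 1: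
--         mask |= 1 << 1
--     v = field("parking_cnt", 0)
--     if v is not None and 1 <= v <= 5:
--         mask |= 1 << 2
--     if field("store_type", 0) == 3:
--         mask |= 1 << 3
--     if field("worker_cnt", -1) == 0:
--         mask |= 1 << 4
--     if field("is_non_premium", 0) == 1:
--         mask |= 1 << 5
--     if field("operation_period", 0) is not None and field("operation_period", 0) >= 12:
--         mask |= 1 << 6
--     if st_code == "0":
--         mask |= 1 << 7
--
--     if mask == 0:
--         return ["8"], "없음"
--
--     codes, labels = [], []
--     m, code = mask >> 1, 1
--     while m:
--         if m & 1:
--             codes.append(str(code))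
--             labels.append(OPTION_LABELS[code])
--         m >>= 1
--         code += 1
--     return codes, ", ".join(labels)
-- ===== Notes on version B (the rewrite author's own statement) =====
-- stated objective: alternative
-- what changed: B encodes the selected options as an integer bitmask (bit c set iff option code c applies) and decodes it with a shift loop that emits codes and labels in one pass in ascending order, instead of A's accumulating a code list via seven try/append blocks and then running sorted(set(codes), key=int) plus a separate label join.
import Mathlib
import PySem

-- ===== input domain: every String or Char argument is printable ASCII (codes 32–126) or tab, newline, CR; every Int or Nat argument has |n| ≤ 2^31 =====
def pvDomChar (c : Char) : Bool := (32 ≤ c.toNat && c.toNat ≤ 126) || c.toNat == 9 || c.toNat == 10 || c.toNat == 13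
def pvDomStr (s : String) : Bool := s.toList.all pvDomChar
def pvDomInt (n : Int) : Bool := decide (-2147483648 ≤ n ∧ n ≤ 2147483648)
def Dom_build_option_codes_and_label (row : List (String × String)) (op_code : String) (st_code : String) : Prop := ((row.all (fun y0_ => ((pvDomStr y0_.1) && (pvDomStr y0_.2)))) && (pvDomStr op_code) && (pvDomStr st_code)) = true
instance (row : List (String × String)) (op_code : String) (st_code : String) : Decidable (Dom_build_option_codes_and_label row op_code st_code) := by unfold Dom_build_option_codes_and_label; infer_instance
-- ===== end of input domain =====

-- B encodes the options as an integer bitmask and decodes it with a shift loop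
-- (codes come out distinct and ascending), replacing A's code-list accumulation
-- plus sorted(set(codes), key=int) (objective: alternative).

-- int(row.get(k) or d): missing key or empty string gives d; otherwise int(s) (none = ValueError)
def pyIntField (row : List (String × String)) (k : String) (d : Int) : Option Int :=
  match (PySem.Dict.mk row).get? k with
  | none => some d
  | some s => if s = "" then some d else PySem.Int.ofStr? s

-- ===== PORT A =====
-- shared module constant of A (the label dict of the Python module)
def OPTION_LABEL_BY_CODE : PySem.Dict String String := PySem.Dict.mk
  [("1","직원 승계 가능"), ("2","주차장 보유매장"), ("3","특수상권"), ("4","오토 운영 가능매장"),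
   ("5","무권리"), ("6","영업기간 1년 이상"), ("7","양도 즉시가능"), ("8","없음")]

-- one 'try: if P(int(row.get(k) or d)): codes.append(c) except: pass' block of A
def tryAppend (row : List (String × String)) (k : String) (d : Int) (P : Int → Prop) [DecidablePred P]
    (codes : List String) (c : String) : List String :=
  match pyIntField row k d with
  | some v => if P v then codes ++ [c] else codes
  | none => codes

def build_option_codes_and_label (row : List (String × String)) (op_code : String) (st_code : String) : List String × String :=
  let codes : List String := []
  let codes := tryAppend row "is_non_premium" 0 (fun v => v = 1) codes "5"
  let codes := tryAppend row "operation_period" 0 (fun v => 12 ≤ v) codes "6"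
  let codes := tryAppend row "worker_cnt" (-1) (fun v => v = 0) codes "4"
  let codes := tryAppend row "parking_cnt" 0 (fun v => v ∈ [(1:Int),2,3,4,5]) codes "2"
  let codes := if st_code = "0" then codes ++ ["7"] else codes
  let codes := tryAppend row "is_employee_takeover" 0 (fun v => v = 1) codes "1"
  let codes := tryAppend row "store_type" 0 (fun v => v = 3) codes "3"
  let codes := PySem.List.sorted (PySem.Set.ofList codes) (fun c => ((PySem.Int.ofStr? c).getD 0 : Int)) false
  -- OPTION_LABEL_BY_CODE[c]: KeyError impossible since codes ⊆ "1".."7"; getD "" is exact here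
  let label := if codes ≠ [] then PySem.Str.join ", " (codes.map (fun c => (OPTION_LABEL_BY_CODE.get? c).getD "")) else "없음"
  let codes := if codes = [] then ["8"] else codes
  (codes, label)

-- ===== PORT B =====
-- B's module constant: labels indexed by code (index 0 is Python's None placeholder, never read)
def OPTION_LABELS : List String :=
  ["", "직원 승계 가능", "주차장 보유매장", "특수상권", "오토 운영 가능매장",
   "무권리", "영업기간 1년 이상", "양도 즉시가능", "없음"]

-- B's 'while m:' decode loop; mask < 256 so the loop runs at most 7 times — fuel 8 is exact
def decodeMask : Nat → Nat → Nat → List String × List String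
  | 0, _, _ => ([], [])
  | _ + 1, 0, _ => ([], [])
  | fuel + 1, m + 1, code =>
      let rest := decodeMask fuel ((m + 1) >>> 1) (code + 1)
      if (m + 1) % 2 = 1 then
        -- OPTION_LABELS[code]: IndexError impossible (1 ≤ code ≤ 7 < 9); getD "" is exact here
        (PySem.Int.toStr code :: rest.1, ((PySem.List.pyGet? OPTION_LABELS (code : Int)).getD "") :: rest.2)
      else rest

def build_option_codes_and_label_alt (row : List (String × String)) (op_code : String) (st_code : String) : List String × String :=
  let mask : Nat := 0
  let mask := if pyIntField row "is_employee_takeover" 0 == some 1 then mask ||| (1 <<< 1) else mask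
  let mask := match pyIntField row "parking_cnt" 0 with      -- v is not None and 1 <= v <= 5
              | some v => if 1 ≤ v ∧ v ≤ 5 then mask ||| (1 <<< 2) else mask
              | none => mask
  let mask := if pyIntField row "store_type" 0 == some 3 then mask ||| (1 <<< 3) else mask
  let mask := if pyIntField row "worker_cnt" (-1) == some 0 then mask ||| (1 <<< 4) else mask
  let mask := if pyIntField row "is_non_premium" 0 == some 1 then mask ||| (1 <<< 5) else mask
  let mask := match pyIntField row "operation_period" 0 with -- field(..) is not None and field(..) >= 12
              | some v => if 12 ≤ v then mask ||| (1 <<< 6) else mask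
              | none => mask
  let mask := if st_code == "0" then mask ||| (1 <<< 7) else mask
  if mask = 0 then (["8"], "없음")
  else
    let r := decodeMask 8 (mask >>> 1) 1
    (r.1, PySem.Str.join ", " r.2)

-- ===== PRECONDITION & SPEC =====
def Spec_build_option_codes_and_label (row : List (String × String)) (op_code : String) (st_code : String) (out : List String × String) : Prop := out = build_option_codes_and_label_alt row op_code st_code
instance (row : List (String × String)) (op_code : String) (st_code : String) (out : List String × String) : Decidable (Spec_build_option_codes_and_label row op_code st_code out) := by unfold Spec_build_option_codes_and_label; infer_instance

-- ===== CLAIM (what is proved, stated in full; the proofs are below) =====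
def Claim_equal_build_option_codes_and_label : Prop := ∀ (row : List (String × String)) (op_code : String) (st_code : String), Dom_build_option_codes_and_label row op_code st_code → Spec_build_option_codes_and_label row op_code st_code (build_option_codes_and_label row op_code st_code)

-- ===== LEMMAS AND PROOFS =====
-- 'the parsed field exists and satisfies p' as one Bool
def condOf (o : Option Int) (p : Int → Bool) : Bool :=
  match o with | some v => p v | none => false

theorem tryAppend_eq_append (row : List (String × String)) (k : String) (d : Int)
    (P : Int → Prop) [DecidablePred P] (codes : List String) (c : String) :
    tryAppend row k d P codes c
      = codes ++ (if condOf (pyIntField row k d) (fun v => decide (P v)) then [c] else []) := by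
  unfold tryAppend condOf
  cases pyIntField row k d with
  | none => simp
  | some v => by_cases h : P v <;> simp [h]

theorem beq_some_eq_condOf (o : Option Int) (t : Int) :
    (o == some t) = condOf o (fun v => decide (v = t)) := by
  cases o <;> [simp [condOf]; (rw [Bool.eq_iff_iff]; simp [condOf])]

theorem match_if_eq_condOf {α : Type} (o : Option Int) (P : Int → Prop) [DecidablePred P] (x y : α) :
    (match o with | some v => if P v then x else y | none => y)
      = (if condOf o (fun v => decide (P v)) then x else y) := by
  cases o with
  | none => simp [condOf]
  | some v => by_cases h : P v <;> simp [condOf, h]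

theorem parking_conds (o : Option Int) :
    condOf o (fun v => decide (v ∈ [(1:Int),2,3,4,5]))
      = condOf o (fun v => decide (1 ≤ v ∧ v ≤ 5)) := by
  cases o with
  | none => rfl
  | some v =>
    simp only [condOf]
    apply decide_eq_decide.mpr
    simp only [List.mem_cons, List.not_mem_nil, or_false]
    omega

theorem st_step (st_code : String) (codes : List String) :
    (if st_code = "0" then codes ++ ["7"] else codes)
      = codes ++ (if st_code == "0" then ["7"] else []) := by
  by_cases h : st_code = "0" <;> simp [h]

-- ===== VERDICT (by name: the statement is the Claim_ definition above) =====
theorem build_option_codes_and_label_spec : Claim_equal_build_option_codes_and_label := by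
  intro row op_code st_code _
  unfold Spec_build_option_codes_and_label
  unfold build_option_codes_and_label build_option_codes_and_label_alt
  simp only [tryAppend_eq_append, st_step, beq_some_eq_condOf, match_if_eq_condOf, parking_conds]
  cases condOf (pyIntField row "is_employee_takeover" 0) (fun v => decide (v = 1)) <;>
  cases condOf (pyIntField row "parking_cnt" 0) (fun v => decide (1 ≤ v ∧ v ≤ 5)) <;>
  cases condOf (pyIntField row "store_type" 0) (fun v => decide (v = 3)) <;>
  cases condOf (pyIntField row "worker_cnt" (-1)) (fun v => decide (v = 0)) <;>
  cases condOf (pyIntField row "is_non_premium" 0) (fun v => decide (v = 1)) <;>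
  cases condOf (pyIntField row "operation_period" 0) (fun v => decide (12 ≤ v)) <;>
  cases st_code == "0" <;> rfl
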